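-- pv_equiv track=rewrite | github.com/ocuisenaire/ASD1-notebooks | 4 - Structures Lineaires/include/tas.py | newick8_from_heap
-- ===== SOURCE A (Python) =====
-- def newick8_from_heap( T, i ):
--     s = ""
--     if 2 * i + 1< len(T):
--         s += "("
--         if 2 * i + 2 < len(T):
--             s += newick8_from_heap(T,2*i+2)
--             s += ","
--         s += newick8_from_heap(T,2*i+1)
--         s += ")"
--     s += "{0}".format(T[i])
--     return s
-- ===== SOURCE B (Python) =====
-- def newick8_from_heap(T, i):
--     n = len(T)
--     memo = {}
--     for j in range(n - 1, -1, -1):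
--         label = "{0}".format(T[j])
--         if 2 * j + 1 < n:
--             if 2 * j + 2 < n:
--                 memo[j] = "(" + memo[2 * j + 2] + "," + memo[2 * j + 1] + ")" + label
--             else:
--                 memo[j] = "(" + memo[2 * j + 1] + ")" + label
--         else:
--             memo[j] = label
--     return memo[i]
-- ===== Notes on version B (the rewrite author's own statement) =====
-- stated objective: alternative
-- what changed: Replaces the top-down recursion by a bottom-up dynamic program: one reversed index loop fills a memo table with the Newick string of every node (children before parents), then returns memo[i]; no recursion at all.
import Mathlib
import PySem

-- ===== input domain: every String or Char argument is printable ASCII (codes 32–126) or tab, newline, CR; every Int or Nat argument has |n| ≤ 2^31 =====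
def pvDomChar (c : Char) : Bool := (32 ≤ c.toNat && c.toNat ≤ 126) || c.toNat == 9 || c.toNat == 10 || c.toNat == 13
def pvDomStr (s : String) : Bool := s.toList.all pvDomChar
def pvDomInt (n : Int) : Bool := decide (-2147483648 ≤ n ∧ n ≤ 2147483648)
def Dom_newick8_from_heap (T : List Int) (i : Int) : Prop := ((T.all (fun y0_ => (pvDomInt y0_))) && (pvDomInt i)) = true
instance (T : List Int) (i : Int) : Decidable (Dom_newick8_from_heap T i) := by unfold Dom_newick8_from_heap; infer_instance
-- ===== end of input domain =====

-- B replaces A's top-down recursion by a bottom-up memo-table loop (alternative decomposition, same cost).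

-- ===== PORT A =====
-- Fuel only makes the recursion total in Lean (Python recurses unboundedly for i < 0,
-- which Pre_ excludes); on Pre_ the fuel T.length + 1 is never exhausted.
def newick8Go (T : List Int) (fuel : Nat) (i : Int) : String :=
  match fuel with
  | 0 => ""
  | fuel + 1 =>
    let s : String := ""
    let s := if 2 * i + 1 < (T.length : Int) then
        let s := s ++ "("
        let s := if 2 * i + 2 < (T.length : Int) then
            s ++ newick8Go T fuel (2 * i + 2) ++ "," else s
        s ++ newick8Go T fuel (2 * i + 1) ++ ")"
      else s
    s ++ PySem.Int.toStr (PySem.List.pyGetD T i 0)   -- T[i]; Pre_ keeps i in range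

def newick8_from_heap (T : List Int) (i : Int) : String :=
  newick8Go T (T.length + 1) i

-- ===== PORT B =====
-- memo[k] lookups are ported as getD _ "" (Python raises KeyError on a missing key; Pre_ excludes those inputs).
def newick8AltStep (T : List Int) (memo : PySem.Dict Int String) (j : Int) : PySem.Dict Int String :=
  let n : Int := (T.length : Int)
  let label := PySem.Int.toStr (PySem.List.pyGetD T j 0)
  if 2 * j + 1 < n then
    if 2 * j + 2 < n then
      memo.insert j ("(" ++ memo.getD (2 * j + 2) "" ++ "," ++ memo.getD (2 * j + 1) "" ++ ")" ++ label)
    else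
      memo.insert j ("(" ++ memo.getD (2 * j + 1) "" ++ ")" ++ label)
  else
    memo.insert j label

def newick8_from_heap_alt (T : List Int) (i : Int) : String :=
  let n : Int := (T.length : Int)
  let memo := (PySem.List.pyRange (n - 1) (-1) (-1)).foldl (newick8AltStep T) PySem.Dict.empty
  memo.getD i ""

-- ===== PRECONDITION & SPEC =====
-- Exactly where Python A returns: for i < 0 A recurses forever (RecursionError),
-- for i ≥ len(T) it raises IndexError (B raises KeyError on both).
def Pre_newick8_from_heap (T : List Int) (i : Int) : Prop := 0 ≤ i ∧ i < (T.length : Int)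
instance (T : List Int) (i : Int) : Decidable (Pre_newick8_from_heap T i) := by unfold Pre_newick8_from_heap; infer_instance
def pvWitness_newick8_from_heap : List Int × Int := ([5, 3, 8, 1], 0)

def Spec_newick8_from_heap (T : List Int) (i : Int) (out : String) : Prop := out = newick8_from_heap_alt T i
instance (T : List Int) (i : Int) (out : String) : Decidable (Spec_newick8_from_heap T i out) := by unfold Spec_newick8_from_heap; infer_instance

-- ===== CLAIM (what is proved, stated in full; the proofs are below) =====
def Claim_equal_newick8_from_heap : Prop := ∀ (T : List Int) (i : Int), Dom_newick8_from_heap T i → Pre_newick8_from_heap T i → Spec_newick8_from_heap T i (newick8_from_heap T i)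

-- ===== LEMMAS AND PROOFS =====

-- Enough fuel makes newick8Go fuel-independent (each recursive call strictly increases the index).
theorem newick8Go_fuel (T : List Int) : ∀ (f g : Nat) (i : Int), 0 ≤ i →
    (T.length : Int) ≤ i + f → (T.length : Int) ≤ i + g → 0 < f → 0 < g →
    newick8Go T f i = newick8Go T g i := by
  intro f
  induction f with
  | zero => intro g i _ _ _ hf _; omega
  | succ f ih =>
    intro g i hi hf hg _ hgpos
    obtain ⟨g, rfl⟩ : ∃ g', g = g' + 1 := ⟨g - 1, by omega⟩
    simp only [newick8Go]
    by_cases h1 : 2 * i + 1 < (T.length : Int)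
    · have hfp : 0 < f := by omega
      have hgp : 0 < g := by omega
      rw [ih g (2 * i + 1) (by omega) (by omega) (by omega) hfp hgp]
      by_cases h2 : 2 * i + 2 < (T.length : Int)
      · rw [ih g (2 * i + 2) (by omega) (by omega) (by omega) hfp hgp]
      · simp [h1, h2]
    · simp [h1]

-- Invariant of B's bottom-up loop: folding the countdown range m-1, …, 0 over a table that is
-- already correct on [m, len T) yields a table correct on [0, len T).
theorem newick8_fold_inv (T : List Int) : ∀ (m : Nat) (d : PySem.Dict Int String),
    (∀ k : Int, (m : Int) ≤ k → k < (T.length : Int) →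
      d.get? k = some (newick8Go T (T.length + 1) k)) →
    ∀ k : Int, 0 ≤ k → k < (T.length : Int) →
      ((PySem.List.pyRange ((m : Int) - 1) (-1) (-1)).foldl (newick8AltStep T) d).get? k
        = some (newick8Go T (T.length + 1) k) := by
  intro m
  induction m with
  | zero =>
    intro d hd k hk0 hkn
    rw [PySem.List.pyRange_neg_one_eq_nil (by omega)]
    exact hd k hk0 hkn
  | succ m ih =>
    intro d hd k hk0 hkn
    have hcast : (((m + 1 : Nat)) : Int) - 1 = (m : Int) := by push_cast; ring
    rw [hcast, PySem.List.pyRange_neg_one_cons (by omega), List.foldl_cons]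
    refine ih _ ?_ k hk0 hkn
    intro k' hk' hk'n
    -- the new table is d with key m set to the Newick string of node m
    have hn1 : 0 < (T.length : Int) := by omega
    by_cases hkm : k' = (m : Int)
    · subst hkm
      -- value written at m equals newick8Go at m: unfold one step of the recursion
      have hstep : newick8Go T (T.length + 1) (m : Int)
          = (let s : String := ""
             let s := if 2 * (m : Int) + 1 < (T.length : Int) then
                 let s := s ++ "("
                 let s := if 2 * (m : Int) + 2 < (T.length : Int) then
                     s ++ newick8Go T T.length (2 * (m : Int) + 2) ++ "," else s
                 s ++ newick8Go T T.length (2 * (m : Int) + 1) ++ ")"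
               else s
             s ++ PySem.Int.toStr (PySem.List.pyGetD T (m : Int) 0)) := rfl
    -- children values in d are newick8Go with full fuel; bridge fuels with newick8Go_fuel
      simp only [newick8AltStep]
      by_cases h1 : 2 * (m : Int) + 1 < (T.length : Int)
      · have hget1 : d.getD (2 * (m : Int) + 1) "" = newick8Go T (T.length + 1) (2 * (m : Int) + 1) :=
          PySem.Dict.getD_of_get?_eq_some _ _ (hd _ (by omega) (by omega))
        by_cases h2 : 2 * (m : Int) + 2 < (T.length : Int)
        · have hget2 : d.getD (2 * (m : Int) + 2) "" = newick8Go T (T.length + 1) (2 * (m : Int) + 2) :=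
            PySem.Dict.getD_of_get?_eq_some _ _ (hd _ (by omega) (by omega))
          simp only [h1, h2, if_pos]
          rw [PySem.Dict.get?_insert_self, hstep]
          simp only [h1, h2, if_pos, hget1, hget2]
          rw [newick8Go_fuel T (T.length + 1) T.length (2 * (m : Int) + 1) (by omega) (by omega) (by omega) (by omega) (by omega),
              newick8Go_fuel T (T.length + 1) T.length (2 * (m : Int) + 2) (by omega) (by omega) (by omega) (by omega) (by omega)]
          simp [String.append_assoc]
        · simp only [h1, h2, if_pos, ite_false]
          rw [PySem.Dict.get?_insert_self, hstep]
          simp only [h1, h2, if_pos, ite_false, hget1]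
          rw [newick8Go_fuel T (T.length + 1) T.length (2 * (m : Int) + 1) (by omega) (by omega) (by omega) (by omega) (by omega)]
          simp [String.append_assoc]
      · simp only [h1, ite_false]
        rw [PySem.Dict.get?_insert_self, hstep]
        simp [h1]
    · -- untouched keys keep their value
      have : k' > (m : Int) := by omega
      simp only [newick8AltStep]
      split_ifs <;>
        rw [PySem.Dict.get?_insert_of_ne _ _ hkm] <;>
        exact hd k' (by omega) hk'n

-- ===== VERDICT (by name: the statement is the Claim_ definition above) =====
theorem newick8_from_heap_spec : Claim_equal_newick8_from_heap := by
  intro T i _ hpre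
  obtain ⟨hi0, hin⟩ := hpre
  unfold Spec_newick8_from_heap newick8_from_heap newick8_from_heap_alt
  have h := newick8_fold_inv T T.length PySem.Dict.empty
    (by intro k hk hkn; omega) i hi0 hin
  exact (PySem.Dict.getD_of_get?_eq_some _ _ h).symm
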